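-- pv_equiv track=rewrite | github.com/SaaidiaFarouk/Genome-Sequencing-Bioinformatics-II- | Week 2/String_Spelled_from_Read_Pairs.py | cyclecreator
-- ===== SOURCE A (Python) =====
-- def graphcomposition(Graph):
--     composition=list()
--     for key in Graph.keys():
--         composition.append(key)
--     for val in Graph.values():
--         for node in val :
--             if node not in composition:
--                 composition.append(node)
--     return composition
--
-- def outdegree(node,Graph):
--     if node not in Graph.keys():
--         outdeg=0
--     else:
--         outdeg=len(Graph[node])
--     return outdeg
--
-- def indegree(node,Graph):
--     indeg=0
--     for nide in Graph.values():
--         for part in nide: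
--             if part==node:
--                 indeg=indeg+1
--     return indeg
--
-- def cyclecreator(Graph):
--     end=''
--     start=''
--     composition=graphcomposition(Graph)
--     for node in composition:
--         if indegree(node,Graph)>outdegree(node,Graph):
--             end=node
--         elif outdegree(node,Graph)>indegree(node,Graph):
--             start=node
--     if end not in Graph.keys() :
--         list1=list()
--         list1.append(start)
--         Graph.update({end:list1})
--     elif end in Graph.keys():
--         Graph[end].append(start)
--     return Graph
-- ===== SOURCE B (Python) =====
-- def cyclecreator(Graph):
--     # One pass over the edges builds an in-degree counter; out-degrees are the
--     # adjacency-list lengths; nodes that appear only as targets are handled in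
--     # one final sweep.  O(V+E) instead of A's O(V*E).  Mutates Graph like A.
--     indeg = {}
--     for targets in Graph.values():
--         for t in targets:
--             indeg[t] = indeg.get(t, 0) + 1
--     end = ''
--     start = ''
--     for node, targets in Graph.items():
--         out = len(targets)
--         inn = indeg.get(node, 0)
--         if inn > out:
--             end = node
--         elif out > inn:
--             start = node
--     seen = set(Graph.keys())
--     for targets in Graph.values():
--         for t in targets:
--             if t not in seen:
--                 seen.add(t)
--                 end = t
--     if end in Graph:
--         Graph[end].append(start)
--     else:
--         Graph[end] = [start]
--     return Graph
-- ===== Notes on version B (the rewrite author's own statement) =====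
-- stated objective: faster
-- what changed: B replaces A's per-node rescans of the whole graph (indegree/outdegree recomputed for every node of the composition) by one pass building an in-degree counter dict, reading out-degrees as adjacency-list lengths, and a final sweep over targets for nodes that never occur as keys.
import Mathlib
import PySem

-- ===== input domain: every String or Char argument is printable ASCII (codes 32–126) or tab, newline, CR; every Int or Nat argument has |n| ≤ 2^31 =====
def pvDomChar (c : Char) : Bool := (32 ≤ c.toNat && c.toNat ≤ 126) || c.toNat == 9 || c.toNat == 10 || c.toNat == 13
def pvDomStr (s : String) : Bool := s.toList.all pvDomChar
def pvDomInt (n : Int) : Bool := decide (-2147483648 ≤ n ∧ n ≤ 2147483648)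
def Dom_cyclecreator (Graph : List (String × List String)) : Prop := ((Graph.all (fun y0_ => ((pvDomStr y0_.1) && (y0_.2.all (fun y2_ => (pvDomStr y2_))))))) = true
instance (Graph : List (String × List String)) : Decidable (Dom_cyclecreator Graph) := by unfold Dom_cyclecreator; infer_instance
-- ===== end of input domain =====

-- B is O(V+E) instead of A's O(V*E): one pass builds an in-degree counter, out-degrees are
-- adjacency-list lengths, and a final sweep handles target-only nodes.  Python A mutates its
-- argument dict in place (B mutates it identically); the equivalence proved is about the return value.

-- ===== PORT A =====
-- composition = keys, then every value node not yet present, in order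
def graphcompositionA (Graph : List (String × List String)) : List String :=
  let composition := (Graph.map Prod.fst).foldl (fun acc k => acc ++ [k]) []
  (Graph.map Prod.snd).foldl
    (fun acc val => val.foldl (fun acc node => if acc.contains node then acc else acc ++ [node]) acc)
    composition

def outdegreeA (node : String) (Graph : List (String × List String)) : Int :=
  if (Graph.map Prod.fst).contains node = false then 0
  else ((PySem.Dict.mk Graph).getD node []).length

def indegreeA (node : String) (Graph : List (String × List String)) : Int :=
  (Graph.map Prod.snd).foldl
    (fun acc nide => nide.foldl (fun acc part => if part == node then acc + 1 else acc) acc) 0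

def cyclecreator (Graph : List (String × List String)) : List (String × List String) :=
  let composition := graphcompositionA Graph
  let es := composition.foldl
    (fun (p : String × String) node =>
      if indegreeA node Graph > outdegreeA node Graph then (node, p.2)
      else if outdegreeA node Graph > indegreeA node Graph then (p.1, node)
      else p) ("", "")
  if (Graph.map Prod.fst).contains es.1 = false then Graph ++ [(es.1, [es.2])]
  else if (Graph.map Prod.fst).contains es.1 then
    Graph.map (fun p => if p.1 == es.1 then (p.1, p.2 ++ [es.2]) else p)
  else Graph

-- ===== PORT B =====
def cyclecreator_alt (Graph : List (String × List String)) : List (String × List String) :=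
  let indeg : PySem.Dict String Int :=
    (Graph.map Prod.snd).foldl
      (fun d targets => targets.foldl (fun d t => d.insert t (d.getD t 0 + 1)) d)
      PySem.Dict.empty
  let es := Graph.foldl
    (fun (p : String × String) kv =>
      let out : Int := kv.2.length
      let inn : Int := indeg.getD kv.1 0
      if inn > out then (kv.1, p.2)
      else if out > inn then (p.1, kv.1)
      else p) ("", "")
  let st := (Graph.map Prod.snd).foldl
    (fun (st : PySem.Set String × String) targets =>
      targets.foldl
        (fun (st : PySem.Set String × String) t =>
          if PySem.Set.contains st.1 t then st else (PySem.Set.add st.1 t, t)) st)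
    (PySem.Set.ofList (Graph.map Prod.fst), es.1)
  let endn := st.2
  let startn := es.2
  if (Graph.map Prod.fst).contains endn then
    Graph.map (fun p => if p.1 == endn then (p.1, p.2 ++ [startn]) else p)
  else Graph ++ [(endn, [startn])]

-- ===== PRECONDITION & SPEC =====
-- Pre_ restricts to genuine dicts — pairwise-distinct keys, the only association lists a Python
-- dict argument can denote; it excludes no input the Python A accepts.
def Pre_cyclecreator (Graph : List (String × List String)) : Prop :=
  (Graph.map Prod.fst).Nodup
instance (Graph : List (String × List String)) : Decidable (Pre_cyclecreator Graph) := by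
  unfold Pre_cyclecreator; infer_instance

def pvWitness_cyclecreator : (List (String × List String)) :=
  [("a", ["b", "c"]), ("b", ["a"])]

def Spec_cyclecreator (Graph : List (String × List String)) (out : List (String × List String)) : Prop := out = cyclecreator_alt Graph
instance (Graph : List (String × List String)) (out : List (String × List String)) : Decidable (Spec_cyclecreator Graph out) := by unfold Spec_cyclecreator; infer_instance

-- ===== CLAIM (what is proved, stated in full; the proofs are below) =====
def Claim_equal_cyclecreator : Prop := ∀ (Graph : List (String × List String)), Dom_cyclecreator Graph → Pre_cyclecreator Graph → Spec_cyclecreator Graph (cyclecreator Graph)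

-- ===== LEMMAS AND PROOFS =====

-- helper: the value-nodes not yet seen, in first-occurrence order
def newsFrom (s : List String) : List String → List String
  | [] => []
  | t :: cs => if s.contains t then newsFrom s cs else t :: newsFrom (s ++ [t]) cs

lemma foldl_add_news (cs : List String) : ∀ (s : List String),
    cs.foldl (fun acc node => if acc.contains node then acc else acc ++ [node]) s
      = s ++ newsFrom s cs := by
  induction cs with
  | nil => intro s; simp [newsFrom]
  | cons t cs ih =>
    intro s
    by_cases h : t ∈ s
    · rw [List.foldl_cons, if_pos (by simpa : s.contains t = true), ih s]
      simp [newsFrom, h]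
    · rw [List.foldl_cons, if_neg (by simpa : ¬ s.contains t = true), ih (s ++ [t])]
      simp [newsFrom, h]

lemma mem_newsFrom {t : String} : ∀ (cs s : List String), t ∈ newsFrom s cs → t ∉ s ∧ t ∈ cs := by
  intro cs
  induction cs with
  | nil => intro s h; simp [newsFrom] at h
  | cons u cs ih =>
    intro s h
    unfold newsFrom at h
    by_cases hc : s.contains u
    · simp only [hc, if_true] at h
      have := ih s h
      exact ⟨this.1, List.mem_cons_of_mem _ this.2⟩
    · simp only [hc, if_false, Bool.false_eq_true, List.mem_cons] at h
      rcases h with h | h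
      · subst h
        exact ⟨by simpa using hc, by simp⟩
      · have := ih (s ++ [u]) h
        exact ⟨fun hm => this.1 (by simp [hm]), by simp [this.2]⟩

lemma indegreeA_eq (node : String) (g : List (String × List String)) :
    indegreeA node g = (((g.map Prod.snd).flatten.count node : Nat) : Int) := by
  unfold indegreeA
  rw [← List.foldl_flatten, PySem.List.foldl_count_if (· == node)]
  simp [List.count]

lemma counter_getD (g : List (String × List String)) (node : String) :
    ((g.map Prod.snd).foldl
        (fun d targets => targets.foldl (fun d t => d.insert t (d.getD t 0 + 1)) d)
        PySem.Dict.empty).getD node 0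
      = (((g.map Prod.snd).flatten.count node : Nat) : Int) := by
  rw [← List.foldl_flatten, PySem.Dict.getD_foldl_insert_add_one]
  simp

lemma outdegreeA_key {g : List (String × List String)} (hnd : (g.map Prod.fst).Nodup)
    {kv : String × List String} (hkv : kv ∈ g) :
    outdegreeA kv.1 g = (kv.2.length : Int) := by
  unfold outdegreeA
  have hmem : kv.1 ∈ g.map Prod.fst := List.mem_map_of_mem hkv
  have hc : (g.map Prod.fst).contains kv.1 = true := by simpa using hmem
  have hget : (PySem.Dict.mk g).getD kv.1 [] = kv.2 :=
    PySem.Dict.getD_of_mem_items (PySem.Dict.mk g) (by simpa using hkv) (by simpa using hnd) []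
  rw [if_neg (by rw [hc]; simp), hget]

lemma outdegreeA_nonkey {g : List (String × List String)} {node : String}
    (h : node ∉ g.map Prod.fst) : outdegreeA node g = 0 := by
  unfold outdegreeA
  have hc : (g.map Prod.fst).contains node = false := by simpa using h
  rw [if_pos hc]

lemma foldl_pair_last (l : List String) : ∀ (p : String × String),
    l.foldl (fun p n => (n, p.2)) p = (l.getLastD p.1, p.2) := by
  induction l with
  | nil => intro p; simp
  | cons t l ih =>
    intro p
    simp only [List.foldl_cons]
    rw [ih, List.getLastD_cons]

lemma seen_fold (cs : List String) : ∀ (s : PySem.Set String) (e : String),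
    cs.foldl
      (fun (st : PySem.Set String × String) t =>
        if PySem.Set.contains st.1 t then st else (PySem.Set.add st.1 t, t)) (s, e)
      = (s ++ newsFrom s cs, (newsFrom s cs).getLastD e) := by
  induction cs with
  | nil => intro s e; simp [newsFrom]
  | cons t cs ih =>
    intro s e
    simp only [List.foldl_cons]
    by_cases hm : t ∈ s
    · rw [if_pos (by simpa [PySem.Set.contains_eq_listContains] using hm)]
      rw [ih s e]
      simp [newsFrom, hm]
    · rw [if_neg (by simp [PySem.Set.contains_eq_listContains, hm])]
      rw [PySem.Set.add_of_not_mem hm, ih (s ++ [t]) t,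
        show newsFrom s (t :: cs) = t :: newsFrom (s ++ [t]) cs from by simp [newsFrom, hm],
        List.getLastD_cons]
      simp

lemma graphcompositionA_eq (g : List (String × List String)) :
    graphcompositionA g
      = g.map Prod.fst ++ newsFrom (g.map Prod.fst) ((g.map Prod.snd).flatten) := by
  unfold graphcompositionA
  rw [PySem.List.foldl_append_singleton_eq_self, ← List.foldl_flatten, List.nil_append,
    foldl_add_news]

-- ===== VERDICT (by name: the statement is the Claim_ definition above) =====
theorem cyclecreator_spec : Claim_equal_cyclecreator := by
  intro g _hdom hnd
  unfold Pre_cyclecreator at hnd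
  simp only [Spec_cyclecreator, cyclecreator, cyclecreator_alt]
  simp only [counter_getD]
  set flat := (g.map Prod.snd).flatten with hflat
  set keys := g.map Prod.fst with hkeys
  set base := g.foldl (fun (p : String × String) kv =>
      if ((flat.count kv.1 : Nat) : Int) > (kv.2.length : Int) then (kv.1, p.2)
      else if (kv.2.length : Int) > ((flat.count kv.1 : Nat) : Int) then (p.1, kv.1) else p)
      ("", "") with hbase
  set news := newsFrom keys flat with hnews
  have hA : (graphcompositionA g).foldl
      (fun (p : String × String) node =>
        if indegreeA node g > outdegreeA node g then (node, p.2)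
        else if outdegreeA node g > indegreeA node g then (p.1, node) else p) ("", "")
      = (news.getLastD base.1, base.2) := by
    rw [graphcompositionA_eq g, List.foldl_append, List.foldl_map]
    have h1 : g.foldl (fun (p : String × String) kv =>
        if indegreeA kv.1 g > outdegreeA kv.1 g then (kv.1, p.2)
        else if outdegreeA kv.1 g > indegreeA kv.1 g then (p.1, kv.1) else p) ("", "")
        = base := by
      rw [hbase]
      apply PySem.List.foldl_congr_mem
      intro acc kv hkv
      rw [indegreeA_eq, outdegreeA_key hnd hkv]
    rw [h1, PySem.List.foldl_congr_mem news _ (fun (p : String × String) n => (n, p.2)) base ?_,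
      foldl_pair_last]
    intro acc n hn
    obtain ⟨hnot, hin⟩ := mem_newsFrom flat keys hn
    rw [if_pos]
    rw [indegreeA_eq, outdegreeA_nonkey hnot]
    exact_mod_cast List.count_pos_iff.mpr hin
  rw [hA]
  have hB : (g.map Prod.snd).foldl
      (fun (st : PySem.Set String × String) targets =>
        targets.foldl
          (fun (st : PySem.Set String × String) t =>
            if PySem.Set.contains st.1 t then st else (PySem.Set.add st.1 t, t)) st)
      (PySem.Set.ofList keys, base.1)
      = (keys ++ news, news.getLastD base.1) := by
    rw [← List.foldl_flatten, PySem.Set.ofList_eq_self_of_nodup _ hnd, seen_fold]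
  rw [hB]
  cases hc : keys.contains (news.getLastD base.1) <;> simp
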